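-- pv_equiv track=rewrite | github.com/SBertrand-47/Obscura47 | join_network.py | _parse_host_flags
-- ===== SOURCE A (Python) =====
-- def _parse_host_flags(argv: list[str]) -> tuple[str | None, str | None]:
--     """Extract --name and --key from trailing argv, returning (name, key)."""
--     name = key = None
--     i = 0
--     while i < len(argv):
--         if argv[i] == "--name" and i + 1 < len(argv):
--             name = argv[i + 1]
--             i += 2
--         elif argv[i].startswith("--name="):
--             name = argv[i].split("=", 1)[1]
--             i += 1
--         elif argv[i] == "--key" and i + 1 < len(argv):
--             key = argv[i + 1]
--             i += 2
--         elif argv[i].startswith("--key="):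
--             key = argv[i].split("=", 1)[1]
--             i += 1
--         else:
--             i += 1
--     return name, key
-- ===== SOURCE B (Python) =====
-- def _parse_host_flags(argv):
--     """Extract --name and --key from trailing argv, returning (name, key)."""
--     name = key = None
--     pending = None
--     for tok in argv:
--         if pending is not None:
--             if pending == "name":
--                 name = tok
--             else:
--                 key = tok
--             pending = None
--         elif tok == "--name":
--             pending = "name"
--         elif tok.startswith("--name="):
--             name = tok.split("=", 1)[1]
--         elif tok == "--key":
--             pending = "key"
--         elif tok.startswith("--key="):
--             key = tok.split("=", 1)[1]
--     return name, key
-- ===== Notes on version B (the rewrite author's own statement) =====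
-- stated objective: alternative
-- what changed: Replaces A's index-based while loop that jumps ahead by 2 to grab a flag's value with a single for-loop over the tokens that carries a 'pending' register recording which flag is awaiting its value.
import Mathlib
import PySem

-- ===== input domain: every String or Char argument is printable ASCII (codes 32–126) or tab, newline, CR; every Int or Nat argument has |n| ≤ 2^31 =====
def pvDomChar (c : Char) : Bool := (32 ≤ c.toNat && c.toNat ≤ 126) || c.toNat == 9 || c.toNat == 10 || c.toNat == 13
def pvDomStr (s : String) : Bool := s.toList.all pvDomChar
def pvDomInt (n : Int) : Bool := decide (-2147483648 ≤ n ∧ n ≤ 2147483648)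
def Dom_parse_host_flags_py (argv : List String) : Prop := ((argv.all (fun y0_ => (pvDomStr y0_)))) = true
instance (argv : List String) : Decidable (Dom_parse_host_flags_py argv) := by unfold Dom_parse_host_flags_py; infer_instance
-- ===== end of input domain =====

-- B replaces A's index-jumping while loop by a one-pass for-loop with a 'pending' register; same return value, similar cost.
-- ===== PORT A =====
-- x.split("=", 1)[1], used only under a startswith("--name="/"--key=") guard (so "=" occurs and index 1 exists)
def pvSplitEq (x : String) : String :=
  match PySem.Str.splitMax? x "=" 1 with
  | some (_ :: v :: _) => v
  | _ => ""

-- A's while loop: the 'i + 1 < len(argv)' guards are realised by the list having (x :: y :: rest) shape;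
-- with one element left only the '--name='/'--key=' branches can fire.
def pyLoopA : Option String → Option String → List String → Option String × Option String
  | name, key, [] => (name, key)
  | name, key, [x] =>
      if PySem.Str.startswith x "--name=" then (some (pvSplitEq x), key)
      else if PySem.Str.startswith x "--key=" then (name, some (pvSplitEq x))
      else (name, key)
  | name, key, x :: y :: rest =>
      if x = "--name" then pyLoopA (some y) key rest
      else if PySem.Str.startswith x "--name=" then pyLoopA (some (pvSplitEq x)) key (y :: rest)
      else if x = "--key" then pyLoopA name (some y) rest
      else if PySem.Str.startswith x "--key=" then pyLoopA name (some (pvSplitEq x)) (y :: rest)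
      else pyLoopA name key (y :: rest)
  termination_by _ _ l => l.length
  decreasing_by all_goals (simp only [List.length_cons]; omega)

def parse_host_flags_py (argv : List String) : Option String × Option String :=
  pyLoopA none none argv

-- ===== PORT B =====
-- state = (pending, name, key)
def stepB (st : Option String × Option String × Option String) (tok : String) :
    Option String × Option String × Option String :=
  match st with
  | (some p, name, key) =>
      if p = "name" then (none, some tok, key) else (none, name, some tok)
  | (none, name, key) =>
      if tok = "--name" then (some "name", name, key)
      else if PySem.Str.startswith tok "--name=" then (none, some (pvSplitEq tok), key)
      else if tok = "--key" then (some "key", name, key)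
      else if PySem.Str.startswith tok "--key=" then (none, name, some (pvSplitEq tok))
      else (none, name, key)

def parse_host_flags_py_alt (argv : List String) : Option String × Option String :=
  let st := argv.foldl stepB (none, none, none)
  (st.2.1, st.2.2)

-- ===== PRECONDITION & SPEC =====
def Spec_parse_host_flags_py (argv : List String) (out : Option String × Option String) : Prop := out = parse_host_flags_py_alt argv
instance (argv : List String) (out : Option String × Option String) : Decidable (Spec_parse_host_flags_py argv out) := by unfold Spec_parse_host_flags_py; infer_instance

-- ===== CLAIM (what is proved, stated in full; the proofs are below) =====
def Claim_equal_parse_host_flags_py : Prop := ∀ (argv : List String), Dom_parse_host_flags_py argv → Spec_parse_host_flags_py argv (parse_host_flags_py argv)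

-- ===== LEMMAS AND PROOFS =====

theorem sw_name_name : PySem.Chars.startswith ['-','-','n','a','m','e'] ['-','-','n','a','m','e','='] = false := by decide
theorem sw_name_key : PySem.Chars.startswith ['-','-','n','a','m','e'] ['-','-','k','e','y','='] = false := by decide
theorem sw_key_name : PySem.Chars.startswith ['-','-','k','e','y'] ['-','-','n','a','m','e','='] = false := by decide
theorem sw_key_key : PySem.Chars.startswith ['-','-','k','e','y'] ['-','-','k','e','y','='] = false := by decide

-- A's loop, started with registers (name, key) and no pending flag, equals B's fold.
theorem loopA_eq_foldB : ∀ (l : List String) (name key : Option String),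
    pyLoopA name key l =
      ((l.foldl stepB (none, name, key)).2.1, (l.foldl stepB (none, name, key)).2.2)
  | [], name, key => by simp [pyLoopA]
  | [x], name, key => by
      by_cases h1 : x = "--name"
      · subst h1; simp [pyLoopA, List.foldl, stepB, sw_name_name, sw_name_key]
      · by_cases h2 : PySem.Chars.startswith x.toList ['-','-','n','a','m','e','='] = true
        · simp [pyLoopA, List.foldl, stepB, h1, h2]
        · by_cases h3 : x = "--key"
          · subst h3; simp [pyLoopA, List.foldl, stepB, sw_key_name, sw_key_key]
          · by_cases h4 : PySem.Chars.startswith x.toList ['-','-','k','e','y','='] = true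
            · simp [pyLoopA, List.foldl, stepB, h1, h2, h3, h4]
            · simp [pyLoopA, List.foldl, stepB, h1, h2, h3, h4]
  | x :: y :: rest, name, key => by
      by_cases h1 : x = "--name"
      · subst h1
        simpa [pyLoopA, List.foldl, stepB] using loopA_eq_foldB rest (some y) key
      · by_cases h2 : PySem.Chars.startswith x.toList ['-','-','n','a','m','e','='] = true
        · simpa [pyLoopA, List.foldl, stepB, h1, h2] using
            loopA_eq_foldB (y :: rest) (some (pvSplitEq x)) key
        · by_cases h3 : x = "--key"
          · subst h3
            simpa [pyLoopA, List.foldl, stepB, h1, h2] using loopA_eq_foldB rest name (some y)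
          · by_cases h4 : PySem.Chars.startswith x.toList ['-','-','k','e','y','='] = true
            · simpa [pyLoopA, List.foldl, stepB, h1, h2, h3, h4] using
                loopA_eq_foldB (y :: rest) name (some (pvSplitEq x))
            · simpa [pyLoopA, List.foldl, stepB, h1, h2, h3, h4] using
                loopA_eq_foldB (y :: rest) name key
  termination_by l _ _ => l.length
  decreasing_by all_goals (simp only [List.length_cons]; omega)

-- ===== VERDICT (by name: the statement is the Claim_ definition above) =====
theorem parse_host_flags_py_spec : Claim_equal_parse_host_flags_py := by
  intro argv _
  unfold Spec_parse_host_flags_py parse_host_flags_py parse_host_flags_py_alt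
  exact loopA_eq_foldB argv none none
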